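-- pv_equiv track=rewrite | github.com/Byongho96/algorithm_practice | Programmers/2019_KAKAO_BLIND_RECRUITMENT/무지의_먹방_라이브.py | solution
-- ===== SOURCE A (Python) =====
-- import heapq
--
-- def solution(food_times, k):
--     # filter invalid
--     if sum(food_times) < k + 1:
--         return -1
--
--     # simulation by time
--     heap = []
--     for idx, time in enumerate(food_times):
--         heapq.heappush(heap, (time, idx))
--
--     n = len(food_times)
--     prev_time = 0
--     answer = 0
--     while heap:
--         time = (heap[0][0] - prev_time) * n
--
--         if k > time:
--             prev_time, _ = heapq.heappop(heap)
--             k -= time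
--             n -= 1
--             continue
--
--         k %= n
--         heap.sort(key=lambda x: x[1])
--         answer = heap[k][1]
--         break
--
--     return answer + 1
-- ===== SOURCE B (Python) =====
-- def solution(food_times, k):
--     # Binary-search the smallest integer threshold x with eaten(x) = sum(min(t, x)) >= k;
--     # no heap, no sorting, no layer-by-layer simulation.
--     if sum(food_times) <= k:
--         return -1
--
--     def eaten(x):
--         return sum(t if t < x else x for t in food_times)
--
--     lo, hi = -(1 << 62), max(food_times)   # eaten(lo) < k <= eaten(hi) on the stated domain
--     while lo + 1 < hi:
--         mid = (lo + hi) // 2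
--         if eaten(mid) >= k:
--             hi = mid
--         else:
--             lo = mid
--     # hi is now the smallest x with eaten(x) >= k
--     survivors = [i for i, t in enumerate(food_times) if t >= hi]
--     r = (k - eaten(hi)) % len(survivors)
--     return survivors[r] + 1
-- ===== Notes on version B (the rewrite author's own statement) =====
-- stated objective: alternative
-- what changed: Replaces the heap-based layer-by-layer simulation (pop minimum, subtract block, repeat) with a binary search over the integer threshold x for the smallest x with eaten(x)=sum(min(t,x)) >= k, each probe being one unordered pass over the list; no heap, no sort, no sequential layer subtraction.
-- outside the precondition, e.g. on solution([], -1): A returns 1, B raises ValueError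
import Mathlib
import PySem

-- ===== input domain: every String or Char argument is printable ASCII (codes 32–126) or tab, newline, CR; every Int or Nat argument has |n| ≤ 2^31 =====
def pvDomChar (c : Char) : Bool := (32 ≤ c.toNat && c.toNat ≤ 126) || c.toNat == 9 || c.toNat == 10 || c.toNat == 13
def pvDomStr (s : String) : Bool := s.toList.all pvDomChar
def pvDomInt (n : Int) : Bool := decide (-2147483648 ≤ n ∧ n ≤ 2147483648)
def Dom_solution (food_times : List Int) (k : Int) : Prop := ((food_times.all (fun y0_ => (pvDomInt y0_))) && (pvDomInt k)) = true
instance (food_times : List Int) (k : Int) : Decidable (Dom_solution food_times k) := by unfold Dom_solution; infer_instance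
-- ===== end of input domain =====

-- B replaces A's heap-based layer simulation by a binary search over the integer threshold x
-- for the smallest x with sum(min(t,x)) >= k; equivalence is about the return value only
-- (A pops from / sorts its local heap list, which the caller cannot observe).

-- ===== PORT A =====
-- heapq is modelled by the lex-sorted list of the heap's contents: heappush = ordered
-- insert, heap[0] = head = minimum, heappop = head + tail.  Every observation A makes of
-- the heap (heap[0][0], the pop order of the distinct (time, idx) pairs, and the final
-- heap.sort(key=idx)) depends only on the heap's contents, so this model is exact.
def heapLt (a b : Int × Int) : Bool := decide (a.1 < b.1 ∨ (a.1 = b.1 ∧ a.2 < b.2))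

def heapPush (heap : List (Int × Int)) (x : Int × Int) : List (Int × Int) :=
  PySem.List.insertBy heapLt x heap

-- the while-loop over (heap, n, prev_time, k, answer)
def simLoop : List (Int × Int) → Int → Int → Int → Int → Int
  | [], _, _, _, answer => answer
  | h :: hs, n, prev, k, answer =>
    let time := (h.1 - prev) * n
    if time < k then            -- 'if k > time: pop'
      simLoop hs (n - 1) h.1 (k - time) answer
    else
      let k' := PySem.Int.mod k n                                       -- k %= n
      match PySem.List.pyGet? (PySem.List.sorted (h :: hs) (fun p => p.2)) k' with
      | some p => p.2                                                   -- answer = heap[k][1]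
      | none => answer          -- unreachable: 0 ≤ k' < n = len(heap)

def solution (food_times : List Int) (k : Int) : Int :=
  if food_times.sum < k + 1 then -1
  else
    let heap := (PySem.List.enumerate food_times).foldl (fun h p => heapPush h (p.2, p.1)) []
    (simLoop heap (food_times.length : Int) 0 k 0) + 1

-- ===== PORT B =====
-- eaten(x) = sum(t if t < x else x for t in food_times)
def eatenInt (fts : List Int) (x : Int) : Int :=
  (fts.map (fun t => if t < x then t else x)).sum

-- the while-loop: invariant eaten(lo) < k <= eaten(hi); mid = (lo + hi) // 2
def bsearch (fts : List Int) (k lo hi : Int) : Int :=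
  if _h : lo + 1 < hi then
    let mid := PySem.Int.floordiv (lo + hi) 2
    if k ≤ eatenInt fts mid then bsearch fts k lo mid else bsearch fts k mid hi
  else hi
termination_by (hi - lo).toNat
decreasing_by
  · have := PySem.Int.floordiv_eq_ediv_of_pos (a := lo + hi) (b := 2) (by omega)
    simp only [this]
    omega
  · have := PySem.Int.floordiv_eq_ediv_of_pos (a := lo + hi) (b := 2) (by omega)
    simp only [this]
    omega

def solution_alt (food_times : List Int) (k : Int) : Int :=
  if food_times.sum ≤ k then -1
  else
    match PySem.List.max? food_times (fun t => t) with
    | none => 0                 -- unreachable under Pre_: max([]) raises only when k < 0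
    | some m =>
      let X := bsearch food_times k (-(2 ^ 62 : Int)) m
      let surv := ((PySem.List.enumerate food_times).filter
        (fun p => decide (X ≤ p.2))).map (fun p => p.1)
      let r := PySem.Int.mod (k - eatenInt food_times X) (surv.length : Int)
      match PySem.List.pyGet? surv r with
      | some j => j + 1
      | none => 0               -- unreachable: 0 ≤ r < len(surv)

-- ===== PRECONDITION & SPEC =====
-- Pre_ excludes only the empty food list with k < 0 (outside the puzzle's domain of at
-- least one food): there A returns the meaningless food number 1 while B's max([]) raises.
def Pre_solution (food_times : List Int) (k : Int) : Prop := food_times ≠ [] ∨ 0 ≤ k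
instance (food_times : List Int) (k : Int) : Decidable (Pre_solution food_times k) := by
  unfold Pre_solution; infer_instance

def pvWitness_solution : List Int × Int := ([3, 1, 2], 5)

def Spec_solution (food_times : List Int) (k : Int) (out : Int) : Prop := out = solution_alt food_times k
instance (food_times : List Int) (k : Int) (out : Int) : Decidable (Spec_solution food_times k out) := by
  unfold Spec_solution; infer_instance

-- ===== CLAIM (what is proved, stated in full; the proofs are below) =====
def Claim_equal_solution : Prop := ∀ (food_times : List Int) (k : Int), Dom_solution food_times k → Pre_solution food_times k → Spec_solution food_times k (solution food_times k)

-- ===== LEMMAS AND PROOFS =====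

-- lex order on (time, idx) pairs, the order heapq pops them in
def lexLe (a b : Int × Int) : Prop := a.1 < b.1 ∨ (a.1 = b.1 ∧ a.2 ≤ b.2)

theorem perm_heapPush (x : Int × Int) (h : List (Int × Int)) :
    (heapPush h x).Perm (x :: h) := by
  induction h with
  | nil => simp [heapPush, PySem.List.insertBy]
  | cons y ys ih =>
    by_cases hb : heapLt x y
    · simp [heapPush, PySem.List.insertBy, hb]
    · simp only [heapPush, PySem.List.insertBy, hb, Bool.false_eq_true, ite_false]
      exact ((ih.cons y).trans (List.Perm.swap x y ys))

theorem pairwise_heapPush (x : Int × Int) (h : List (Int × Int))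
    (hs : h.Pairwise lexLe) : (heapPush h x).Pairwise lexLe := by
  induction h with
  | nil => simp [heapPush, PySem.List.insertBy]
  | cons y ys ih =>
    rcases List.pairwise_cons.mp hs with ⟨hy, hys⟩
    by_cases hb : heapLt x y
    · simp only [heapPush, PySem.List.insertBy, hb, ite_true]
      refine List.pairwise_cons.mpr ⟨?_, hs⟩
      intro z hz
      have hxy : lexLe x y := by
        simp only [heapLt, decide_eq_true_eq] at hb
        rcases hb with h1 | h2
        · exact Or.inl h1
        · exact Or.inr ⟨h2.1, le_of_lt h2.2⟩
      rcases List.mem_cons.mp hz with rfl | hz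
      · exact hxy
      · have := hy z hz
        unfold lexLe at *; rcases hxy with h1 | h2 <;> rcases this with h3 | h4 <;>
          [left; left; left; right] <;> omega
    · simp only [heapPush, PySem.List.insertBy, hb, Bool.false_eq_true, ite_false]
      refine List.pairwise_cons.mpr ⟨?_, ih hys⟩
      intro z hz
      rw [show PySem.List.insertBy heapLt x ys = heapPush ys x from rfl] at hz
      have hmem := (PySem.List.mem_insertBy heapLt x z ys).mp hz
      rcases hmem with rfl | hz'
      · simp only [heapLt, decide_eq_true_eq] at hb
        unfold lexLe; omega
      · exact hy z hz'

theorem heap_fold (l : List (Int × Int)) :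
    ∀ acc : List (Int × Int), acc.Pairwise lexLe →
      (l.foldl heapPush acc).Pairwise lexLe ∧ (l.foldl heapPush acc).Perm (l ++ acc) := by
  induction l with
  | nil => intro acc hacc; exact ⟨hacc, by simp⟩
  | cons x xs ih =>
    intro acc hacc
    have h1 := ih (heapPush acc x) (pairwise_heapPush x acc hacc)
    refine ⟨h1.1, h1.2.trans ?_⟩
    have p1 : (xs ++ heapPush acc x).Perm (xs ++ (x :: acc)) :=
      List.Perm.append_left xs (perm_heapPush x acc)
    have p2 : (xs ++ (x :: acc)).Perm (x :: (xs ++ acc)) := List.perm_middle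
    exact p1.trans p2

-- the value A reads off at the break: (sorted remaining-heap by idx)[r][1]
def pick (M : List (Int × Int)) (r : Int) : Int :=
  match PySem.List.pyGet? (PySem.List.sorted M (fun p => p.2)) r with
  | some p => p.2
  | none => 0

-- the central invariant: on a lex-sorted heap L, A's loop (with accumulated state prev,
-- and k already reduced by pre + prev·|L|) breaks at the smallest heap value c with
-- pre + Σ min(w,c) ≥ k, and returns the pick of the still-remaining foods (value ≥ c);
-- at every smaller heap value v the cumulative cost pre + Σ min(w,v) is still < k.
theorem main_lemma (L : List (Int × Int)) :
    ∀ prev pre k : Int, L ≠ [] → L.Pairwise lexLe →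
      k ≤ pre + (L.map (fun p => p.1)).sum →
      ∃ c eaten rem,
        c ∈ L.map (fun p => p.1)
        ∧ k ≤ eaten
        ∧ eaten = pre + ((L.map (fun p => p.1)).map (fun w => min w c)).sum
        ∧ rem = ((L.filter (fun p => decide (c ≤ p.1))).length : Int)
        ∧ (∀ v ∈ L.map (fun p => p.1), v < c →
            pre + ((L.map (fun p => p.1)).map (fun w => min w v)).sum < k)
        ∧ simLoop L (L.length : Int) prev (k - pre - prev * L.length) 0
            = pick (L.filter (fun p => decide (c ≤ p.1))) (PySem.Int.mod (k - eaten) rem) := by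
  induction L with
  | nil => intro _ _ _ hne _ _; exact absurd rfl hne
  | cons v rest ih =>
    intro prev pre k _ hpw hk
    have hvle : ∀ p ∈ rest, v.1 ≤ p.1 := by
      intro p hp
      have := (List.pairwise_cons.mp hpw).1 p hp
      unfold lexLe at this; omega
    by_cases hbr : k ≤ pre + v.1 * ((v :: rest).length : Int)
    · -- break immediately: c = v.1, the whole heap remains
      refine ⟨v.1, pre + v.1 * ((v :: rest).length : Int), ((v :: rest).length : Int),
        by simp, hbr, ?_, ?_, ?_, ?_⟩
      · -- eaten = pre + Σ min(w, v.1): every w ≥ v.1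
        have hmin : ((v :: rest).map (fun p => p.1)).map (fun w => min w v.1)
            = ((v :: rest).map (fun p => p.1)).map (fun _ => v.1) := by
          apply List.map_congr_left
          intro w hw
          simp only [List.mem_map] at hw
          obtain ⟨p, hp, rfl⟩ := hw
          rcases List.mem_cons.mp hp with rfl | hp'
          · simp
          · have := hvle p hp'; omega
        rw [hmin, PySem.List.sum_map_const_int]
        simp [mul_comm]
      · rw [List.filter_eq_self.mpr]
        intro p hp
        rcases List.mem_cons.mp hp with rfl | hp'
        · simp
        · simpa using (hvle p hp')
      · -- minimality: no heap value is below c = v.1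
        intro u hu hlt
        simp only [List.mem_map] at hu
        obtain ⟨p, hp, rfl⟩ := hu
        rcases List.mem_cons.mp hp with rfl | hp'
        · omega
        · have := hvle p hp'; omega
      · have hfilter : (v :: rest).filter (fun p => decide (v.1 ≤ p.1)) = v :: rest := by
          rw [List.filter_eq_self.mpr]
          intro p hp
          rcases List.mem_cons.mp hp with rfl | hp'
          · simp
          · simpa using (hvle p hp')
        have hcond : ¬ ((v.1 - prev) * ((v :: rest).length : Int)
            < k - pre - prev * ((v :: rest).length : Int)) := by
          have : (v.1 - prev) * ((v :: rest).length : Int)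
              = v.1 * ((v :: rest).length : Int) - prev * ((v :: rest).length : Int) := by ring
          omega
        have hmod : PySem.Int.mod (k - pre - prev * ((v :: rest).length : Int))
              ((v :: rest).length : Int)
            = PySem.Int.mod (k - (pre + v.1 * ((v :: rest).length : Int)))
              ((v :: rest).length : Int) := by
          have harg : k - pre - prev * ((v :: rest).length : Int)
              = (k - (pre + v.1 * ((v :: rest).length : Int)))
                + (v.1 - prev) * ((v :: rest).length : Int) := by ring
          unfold PySem.Int.mod
          rw [harg, Int.add_mul_fmod_self_right]
        simp only [simLoop, hcond, ite_false, hfilter, pick, hmod]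
    · -- pop v: recurse on rest
      push Not at hbr
      have hlen : ((v :: rest).length : Int) = (rest.length : Int) + 1 := by
        simp
      have hrne : rest ≠ [] := by
        rintro rfl
        simp only [List.length_cons, List.length_nil] at hbr
        simp only [List.map_cons, List.map_nil, List.sum_cons, List.sum_nil] at hk
        omega
      have hk' : k ≤ (pre + v.1) + (rest.map (fun p => p.1)).sum := by
        simp only [List.map_cons, List.sum_cons] at hk
        omega
      obtain ⟨c, eaten, rem, hmem, hke, heat, hrem, hminp, hsim⟩ :=
        ih v.1 (pre + v.1) k hrne (List.pairwise_cons.mp hpw).2 hk'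
      -- v.1 < c (a duplicate of the popped value cannot be the break value)
      have hvc : v.1 < c := by
        by_contra hle
        push Not at hle
        obtain ⟨p, hp, hpc⟩ := List.mem_map.mp hmem
        have hceq : c = v.1 := le_antisymm hle (hpc ▸ hvle p hp)
        rw [hceq] at heat
        have hmin : (rest.map (fun p => p.1)).map (fun w => min w v.1)
            = (rest.map (fun p => p.1)).map (fun _ => v.1) := by
          apply List.map_congr_left
          intro w hw
          simp only [List.mem_map] at hw
          obtain ⟨q, hq, rfl⟩ := hw
          have := hvle q hq; omega
        rw [hmin, PySem.List.sum_map_const_int, List.length_map] at heat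
        rw [hlen] at hbr
        have hexp : v.1 * ((rest.length : Int) + 1) = v.1 + (rest.length : Int) * v.1 := by ring
        linarith
      have hfc : ¬ (c ≤ v.1) := by omega
      refine ⟨c, eaten, rem, ?_, hke, ?_, ?_, ?_, ?_⟩
      · simp only [List.map_cons, List.mem_cons]; right; exact hmem
      · rw [heat]
        simp only [List.map_cons, List.sum_cons]
        have : min v.1 c = v.1 := by omega
        rw [this]; ring
      · rw [List.filter_cons_of_neg (by simpa using hfc)]
        exact hrem
      · -- minimality
        intro u hu hlt
        simp only [List.map_cons, List.mem_cons] at hu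
        rcases hu with heq | hu'
        · -- u = v.1: the failed loop condition is exactly the cumulative cost at v.1
          have hminc : ((v :: rest).map (fun p => p.1)).map (fun w => min w u)
              = ((v :: rest).map (fun p => p.1)).map (fun _ => u) := by
            apply List.map_congr_left
            intro w hw
            simp only [List.mem_map] at hw
            obtain ⟨p, hp, rfl⟩ := hw
            rcases List.mem_cons.mp hp with rfl | hp'
            · omega
            · have := hvle p hp'; omega
          rw [hminc, PySem.List.sum_map_const_int]
          simp only [List.length_map]
          calc pre + ((v :: rest).length : Int) * u
              = pre + u * ((v :: rest).length : Int) := by ring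
            _ = pre + v.1 * ((v :: rest).length : Int) := by rw [heq]
            _ < k := hbr
        · have := hminp u hu' hlt
          simp only [List.map_cons, List.sum_cons]
          have hmv : min v.1 u = v.1 := by
            obtain ⟨p, hp, hpc⟩ := List.mem_map.mp hu'
            have := hvle p hp; omega
          rw [hmv]
          omega
      · rw [List.filter_cons_of_neg (by simpa using hfc)]
        have hcond : (v.1 - prev) * ((v :: rest).length : Int)
            < k - pre - prev * ((v :: rest).length : Int) := by
          have : (v.1 - prev) * ((v :: rest).length : Int)
              = v.1 * ((v :: rest).length : Int) - prev * ((v :: rest).length : Int) := by ring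
          omega
        simp only [simLoop, hcond, if_pos]
        rw [show ((v :: rest).length : Int) - 1 = (rest.length : Int) from by omega]
        rw [show k - pre - prev * ((v :: rest).length : Int)
              - (v.1 - prev) * ((v :: rest).length : Int)
            = k - (pre + v.1) - v.1 * (rest.length : Int) from by rw [hlen]; ring]
        rw [show ((v :: rest).length : Int) = (rest.length : Int) + 1 from hlen] at *
        convert hsim using 3

-- eaten is monotone in the threshold
theorem eaten_mono (fts : List Int) {x y : Int} (h : x ≤ y) :
    eatenInt fts x ≤ eatenInt fts y := by
  induction fts with
  | nil => simp [eatenInt]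
  | cons t ts ih =>
    simp only [eatenInt, List.map_cons, List.sum_cons] at *
    have : (if t < x then t else x) ≤ (if t < y then t else y) := by split_ifs <;> omega
    omega

-- the binary search returns the smallest x with eaten(x) ≥ k (given the invariant at lo, hi)
theorem bsearch_spec (fts : List Int) (k : Int) :
    ∀ (n : Nat) (lo hi : Int), (hi - lo).toNat ≤ n → lo < hi →
      eatenInt fts lo < k → k ≤ eatenInt fts hi →
      lo < bsearch fts k lo hi ∧ bsearch fts k lo hi ≤ hi ∧
      k ≤ eatenInt fts (bsearch fts k lo hi) ∧ eatenInt fts (bsearch fts k lo hi - 1) < k := by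
  intro n
  induction n with
  | zero => intro lo hi hb hlt _ _; omega
  | succ n ih =>
    intro lo hi hb hlt hlo hhi
    rw [bsearch]
    by_cases h : lo + 1 < hi
    · rw [dif_pos h]
      have hmid := PySem.Int.floordiv_eq_ediv_of_pos (a := lo + hi) (b := 2) (by omega)
      have hm1 : lo < PySem.Int.floordiv (lo + hi) 2 := by rw [hmid]; omega
      have hm2 : PySem.Int.floordiv (lo + hi) 2 < hi := by rw [hmid]; omega
      by_cases hc : k ≤ eatenInt fts (PySem.Int.floordiv (lo + hi) 2)
      · simp only [hc, ite_true]
        have := ih lo (PySem.Int.floordiv (lo + hi) 2) (by omega) hm1 hlo hc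
        exact ⟨this.1, by omega, this.2.2⟩
      · simp only [hc, ite_false]
        push Not at hc
        have := ih (PySem.Int.floordiv (lo + hi) 2) hi (by omega) hm2 hc hhi
        exact ⟨by omega, this.2⟩
    · rw [dif_neg h]
      have : hi = lo + 1 := by omega
      refine ⟨hlt, le_refl _, hhi, ?_⟩
      rw [this]; simpa using hlo

-- shifting the threshold from X up to c changes eaten by (c - X)·#{t ≥ c}
-- when no list value lies in [X, c)
theorem eaten_shift (fts : List Int) (X c : Int)
    (hsep : ∀ t ∈ fts, (X ≤ t ↔ c ≤ t)) :
    eatenInt fts X + (c - X) * ((fts.filter (fun t => decide (c ≤ t))).length : Int)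
      = eatenInt fts c := by
  induction fts with
  | nil => simp [eatenInt]
  | cons t ts ih =>
    have hsep' : ∀ s ∈ ts, (X ≤ s ↔ c ≤ s) := fun s hs => hsep s (List.mem_cons_of_mem t hs)
    have iht := ih hsep'
    have hst := hsep t (List.mem_cons_self)
    by_cases hct : c ≤ t
    · have hXt : X ≤ t := hst.mpr hct
      rw [List.filter_cons_of_pos (by simpa using hct)]
      simp only [eatenInt, List.map_cons, List.sum_cons,
        if_neg (show ¬ t < X by omega), if_neg (show ¬ t < c by omega)] at *
      rw [List.length_cons]
      push_cast
      linear_combination iht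
    · have hXt : ¬ X ≤ t := fun h => hct (hst.mp h)
      rw [List.filter_cons_of_neg (by simpa using hct)]
      simp only [eatenInt, List.map_cons, List.sum_cons,
        if_pos (show t < X by omega), if_pos (show t < c by omega)] at *
      linear_combination iht

-- eatenInt is Σ min(t, x)
theorem eaten_eq_sum_min (fts : List Int) (x : Int) :
    eatenInt fts x = (fts.map (fun t => min t x)).sum := by
  unfold eatenInt
  congr 1
  apply List.map_congr_left
  intro t _
  split_ifs <;> omega

-- ===== VERDICT (by name: the statement is the Claim_ definition above) =====
theorem solution_spec : Claim_equal_solution := by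
  intro food k hdom hpre
  unfold Spec_solution solution solution_alt
  by_cases hg : food.sum < k + 1
  · rw [if_pos hg, if_pos (by omega)]
  · rw [if_neg hg, if_neg (by omega)]
    -- the food list is nonempty (empty + ¬(0 ≤ k) is exactly what Pre_ excludes)
    have hfne : food ≠ [] := by
      rintro rfl
      rcases hpre with h | h
      · exact h rfl
      · simp only [List.sum_nil] at hg; omega
    -- domain bounds
    simp only [Dom_solution, Bool.and_eq_true, List.all_eq_true, pvDomInt,
      decide_eq_true_eq] at hdom
    obtain ⟨hdomf, hdomk⟩ := hdom
    -- the maximum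
    obtain ⟨m, hm⟩ : ∃ m, PySem.List.max? food (fun t => t) = some m := by
      cases h : PySem.List.max? food (fun t => t) with
      | none => exact absurd ((PySem.List.max?_eq_none_iff food (fun t => t)).mp h) hfne
      | some m => exact ⟨m, rfl⟩
    rw [hm]
    have hmmem : m ∈ food := PySem.List.max?_mem hm
    have hmmax : ∀ t ∈ food, t ≤ m := fun t ht => PySem.List.max?_isMax hm t ht
    -- the binary-search invariant at the initial bounds
    have hlo0 : eatenInt food (-(2 ^ 62 : Int)) < k := by
      have hconst : food.map (fun t => if t < -(2 ^ 62 : Int) then t else -(2 ^ 62 : Int))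
          = food.map (fun _ => -(2 ^ 62 : Int)) := by
        apply List.map_congr_left
        intro t ht
        have := hdomf t ht
        rw [if_neg (by omega)]
      unfold eatenInt
      rw [hconst, PySem.List.sum_map_const_int]
      have hn : (1 : Int) ≤ (food.length : Int) := by
        cases food with
        | nil => exact absurd rfl hfne
        | cons a l => simp
      nlinarith [hdomk.1]
    have hhi0 : k ≤ eatenInt food m := by
      have hid : food.map (fun t => if t < m then t else m) = food.map (fun t => t) := by
        apply List.map_congr_left
        intro t ht
        have := hmmax t ht
        split_ifs <;> omega
      unfold eatenInt
      rw [hid, List.map_id']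
      omega
    have hlohi : (-(2 ^ 62 : Int)) < m := by have := (hdomf m hmmem).1; omega
    obtain ⟨hX1, hX2, hXk, hXk1⟩ :=
      bsearch_spec food k (m - (-(2 ^ 62 : Int))).toNat (-(2 ^ 62 : Int)) m
        (le_refl _) hlohi hlo0 hhi0
    set X := bsearch food k (-(2 ^ 62 : Int)) m with hX
    -- the heap
    set ent := PySem.List.enumerate food 0 with hent
    set pairs := ent.map (fun p => (p.2, p.1)) with hpairs
    have hfold := heap_fold pairs [] (List.Pairwise.nil)
    set heap := pairs.foldl heapPush [] with hheap
    have hheap' : ent.foldl (fun h p => heapPush h (p.2, p.1)) [] = heap := by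
      rw [hheap, hpairs, List.foldl_map]
    have hpw : heap.Pairwise lexLe := hfold.1
    have hperm : heap.Perm pairs := by simpa using hfold.2
    have hmfst : pairs.map (fun p => p.1) = food := by
      rw [hpairs, List.map_map]
      exact PySem.List.map_snd_enumerate food 0
    have hpermf : (heap.map (fun p => p.1)).Perm food := by
      rw [← hmfst]; exact hperm.map _
    have hsum : (heap.map (fun p => p.1)).sum = food.sum := hpermf.sum_eq
    have hlen : heap.length = food.length := by
      have := hperm.length_eq
      simp only [hpairs, List.length_map, hent, PySem.List.length_enumerate] at this
      exact this
    obtain ⟨c, eaten, rem, hmem, hke, heat, hrem, hminp, hsim⟩ :=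
      main_lemma heap 0 0 k
        (by intro h; rw [h] at hlen; cases food <;> simp_all)
        hpw (by rw [hsum]; omega)
    rw [show k - 0 - 0 * (heap.length : Int) = k from by ring] at hsim
    -- cumulative cost at a threshold, over food instead of over the heap
    have hcost : ∀ v : Int, 0 + ((heap.map (fun p => p.1)).map (fun w => min w v)).sum
        = eatenInt food v := by
      intro v
      rw [zero_add, eaten_eq_sum_min, (hpermf.map (fun t => min t v)).sum_eq]
    -- eaten = eatenInt food c,  k ≤ eatenInt food c
    have heatc : eatenInt food c = eaten := by rw [heat, hcost]
    -- X ≤ c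
    have hXc : X ≤ c := by
      by_contra hlt
      push Not at hlt
      have : eatenInt food c ≤ eatenInt food (X - 1) := eaten_mono food (by omega)
      omega
    -- no food value lies in [X, c)
    have hsep : ∀ t ∈ food, (X ≤ t ↔ c ≤ t) := by
      intro t ht
      constructor
      · intro hXt
        by_contra hct
        push Not at hct
        have hth : t ∈ heap.map (fun p => p.1) := hpermf.mem_iff.mpr ht
        have := hminp t hth hct
        rw [hcost] at this
        have := eaten_mono food hXt
        omega
      · intro hct; omega
    -- A's remaining foods F (value ≥ c) equal B's survivors (value ≥ X)
    set F := ent.filter (fun p => decide (c ≤ p.2)) with hF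
    have hsurv : ent.filter (fun p => decide (X ≤ p.2)) = F := by
      rw [hF]
      apply List.filter_congr
      intro p hp
      have hp2 : p.2 ∈ food := by
        have : p.2 ∈ ent.map (fun q => q.2) := List.mem_map_of_mem hp
        rwa [hent, PySem.List.map_snd_enumerate] at this
      simp only [decide_eq_decide]
      exact hsep p.2 hp2
    have hfiltperm : (heap.filter (fun p => decide (c ≤ p.1))).Perm
        (F.map (fun p => (p.2, p.1))) := by
      have h1 := hperm.filter (fun p => decide (c ≤ p.1))
      have h2 : pairs.filter (fun p => decide (c ≤ p.1))
          = F.map (fun p => (p.2, p.1)) := by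
        rw [hpairs, List.filter_map, hF]
        rfl
      rw [h2] at h1; exact h1
    have hFsorted : PySem.List.sorted (heap.filter (fun p => decide (c ≤ p.1))) (fun p => p.2)
        = F.map (fun p => (p.2, p.1)) := by
      apply PySem.List.sorted_eq_of_perm_of_pairwise_lt
      · exact hfiltperm.symm
      · rw [List.pairwise_map]
        have := (PySem.List.pairwise_lt_enumerate food 0).filter (fun p => decide (c ≤ p.2))
        exact this.imp (fun h => h)
    have hrem' : rem = (F.length : Int) := by
      rw [hrem, hfiltperm.length_eq]
      simp
    have hrempos : 0 < rem := by
      obtain ⟨p, hp, hpc⟩ := List.mem_map.mp hmem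
      have hpf : p ∈ heap.filter (fun p => decide (c ≤ p.1)) :=
        List.mem_filter.mpr ⟨hp, by simp [hpc]⟩
      rw [hrem]
      have := List.length_pos_of_mem hpf
      omega
    -- the two mod offsets agree: eatenInt food X and eaten differ by a multiple of rem
    have hfoodfilt : (food.filter (fun t => decide (c ≤ t))).length = F.length := by
      have : food.filter (fun t => decide (c ≤ t))
          = (ent.filter (fun p => decide (c ≤ p.2))).map (fun p => p.2) := by
        conv_lhs => rw [← PySem.List.map_snd_enumerate food 0, ← hent]
        rw [List.filter_map]
        rfl
      rw [this, List.length_map, hF]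
    have hshift := eaten_shift food X c hsep
    rw [hfoodfilt, ← hrem', heatc] at hshift
    have hmodeq : PySem.Int.mod (k - eatenInt food X) rem = PySem.Int.mod (k - eaten) rem := by
      have harg : k - eatenInt food X = (k - eaten) + (c - X) * rem := by omega
      unfold PySem.Int.mod
      rw [harg, Int.add_mul_fmod_self_right]
    set r := PySem.Int.mod (k - eaten) rem with hr
    have hr0 : 0 ≤ r := PySem.Int.mod_nonneg _ hrempos
    have hrlt : r < rem := PySem.Int.mod_lt _ hrempos
    have hrn : r.toNat < F.length := by
      rw [hrem'] at hrlt; omega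
    have hgetF : F[r.toNat]? = some F[r.toNat] := List.getElem?_eq_getElem hrn
    -- A's pick
    have hpick : pick (heap.filter (fun p => decide (c ≤ p.1))) r = F[r.toNat].1 := by
      unfold pick
      rw [hFsorted, PySem.List.pyGet?_of_nonneg _ hr0, List.getElem?_map, hgetF]
      rfl
    -- B's survivor lookup
    have hsurvlen : ((F.map (fun p => p.1)).length : Int) = rem := by
      rw [List.length_map, hrem']
    have hcands : PySem.List.pyGet? (F.map (fun p => p.1)) r = some F[r.toNat].1 := by
      rw [PySem.List.pyGet?_of_nonneg _ hr0, List.getElem?_map, hgetF]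
      rfl
    simp only [hheap', show ((food.length : Int)) = ((heap.length : Int)) from by rw [hlen],
      hsim, hpick, ← hX, hsurv, hsurvlen, hmodeq, hcands]
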